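-- pv_equiv track=rewrite | github.com/wasefashaikh2008-maker/phishguard | detector/report.py | _count_repeated_chars
-- ===== SOURCE A (Python) =====
-- def _count_repeated_chars(text):
--     """Count repeated consecutive characters"""
--     if not text:
--         return 0
--     count = 0
--     for i in range(1, len(text)):
--         if text[i] == text[i - 1]:
--             count += 1
--     return count
-- ===== SOURCE B (Python) =====
-- def _count_repeated_chars(text):
--     """Count repeated consecutive characters"""
--     # Stage 1: run-length encode the text into the list of maximal run lengths.
--     run_lengths = []
--     i = 0
--     n = len(text)
--     while i < n:
--         j = i
--         while j < n and text[j] == text[i]: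
--             j += 1
--         run_lengths.append(j - i)
--         i = j
--     # Stage 2: a run of length L contains exactly L - 1 equal-adjacent pairs.
--     return sum(L - 1 for L in run_lengths)
-- ===== Notes on version B (the rewrite author's own statement) =====
-- stated objective: alternative
-- what changed: B run-length encodes the text (an outer loop extracting each maximal run with an inner scan) and then sums L-1 over the run lengths, instead of A's single index loop comparing text[i] with text[i-1].
import Mathlib
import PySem

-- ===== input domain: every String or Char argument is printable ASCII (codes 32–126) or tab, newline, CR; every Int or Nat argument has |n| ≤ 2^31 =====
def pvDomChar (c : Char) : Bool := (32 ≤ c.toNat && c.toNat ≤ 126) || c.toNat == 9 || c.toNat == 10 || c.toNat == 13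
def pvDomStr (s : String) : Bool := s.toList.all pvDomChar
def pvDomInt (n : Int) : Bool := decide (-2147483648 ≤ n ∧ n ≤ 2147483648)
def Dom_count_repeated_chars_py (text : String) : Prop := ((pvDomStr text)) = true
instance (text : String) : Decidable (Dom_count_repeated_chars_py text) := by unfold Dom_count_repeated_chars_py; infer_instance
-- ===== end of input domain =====

-- B run-length encodes the text and sums L-1 over the run lengths; same O(n) cost, different decomposition.

-- ===== PORT A =====
-- literal transliteration of A: index loop over range(1, len(text)) comparing text[i] with text[i-1]
def count_repeated_chars_py (text : String) : Int :=
  if text.toList = [] then 0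
  else
    (PySem.List.pyRange 1 (text.toList.length : Int) 1).foldl
      (fun count i =>
        if PySem.List.pyGet? text.toList i = PySem.List.pyGet? text.toList (i - 1) then count + 1
        else count) 0

-- ===== PORT B =====
/-- inner `while j < n and text[j] == text[i]` scan: length of the maximal
prefix of characters equal to `c`, together with the remaining suffix -/
def pvTakeRun (c : Char) : List Char → Nat × List Char
  | [] => (0, [])
  | x :: t =>
    if x = c then
      let p := pvTakeRun c t
      (p.1 + 1, p.2)
    else (0, x :: t)

lemma pvTakeRun_snd_length (c : Char) : ∀ t : List Char, (pvTakeRun c t).2.length ≤ t.length := by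
  intro t
  induction t with
  | nil => simp [pvTakeRun]
  | cons x t ih =>
    by_cases h : x = c
    · simp only [pvTakeRun, if_pos h]
      exact le_trans ih (Nat.le_succ _)
    · simp [pvTakeRun, if_neg h]

/-- outer `while i < n` loop: the list of maximal run lengths of the text -/
def pvRunLengths : List Char → List Int
  | [] => []
  | c :: t => ((pvTakeRun c t).1 + 1 : Int) :: pvRunLengths (pvTakeRun c t).2
  termination_by l => l.length
  decreasing_by exact Nat.lt_succ_of_le (pvTakeRun_snd_length c t)

-- transliteration of B: run-length encode, then sum (L - 1) over the run lengths
def count_repeated_chars_py_alt (text : String) : Int :=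
  (pvRunLengths text.toList).foldl (fun s L => s + (L - 1)) 0

-- ===== PRECONDITION & SPEC =====
def Spec_count_repeated_chars_py (text : String) (out : Int) : Prop := out = count_repeated_chars_py_alt text
instance (text : String) (out : Int) : Decidable (Spec_count_repeated_chars_py text out) := by unfold Spec_count_repeated_chars_py; infer_instance

-- ===== CLAIM (what is proved, stated in full; the proofs are below) =====
def Claim_equal_count_repeated_chars_py : Prop := ∀ (text : String), Dom_count_repeated_chars_py text → Spec_count_repeated_chars_py text (count_repeated_chars_py text)

-- ===== LEMMAS AND PROOFS =====

/-- number of equal-adjacent pairs in a character list -/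
def pvPairs : List Char → Int
  | a :: b :: t => (if a = b then 1 else 0) + pvPairs (b :: t)
  | _ => 0

/-- A's index fold over the suffix `a :: r` of `pre ++ a :: r` computes `pvPairs (a :: r)`. -/
lemma keyA : ∀ (r : List Char) (pre : List Char) (a : Char) (c : Int),
    (PySem.List.pyRange ((pre.length : Int) + 1) (((pre ++ a :: r).length : Int)) 1).foldl
      (fun count i =>
        if PySem.List.pyGet? (pre ++ a :: r) i = PySem.List.pyGet? (pre ++ a :: r) (i - 1) then count + 1
        else count) c = c + pvPairs (a :: r) := by
  intro r
  induction r with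
  | nil =>
    intro pre a c
    rw [PySem.List.pyRange_one_eq_nil (by simp)]
    simp [pvPairs]
  | cons b r' ih =>
    intro pre a c
    rw [PySem.List.pyRange_one_cons
      (by simp only [List.length_append, List.length_cons]; push_cast; omega)]
    rw [List.foldl_cons]
    have h1 : PySem.List.pyGet? (pre ++ a :: b :: r') ((pre.length : Int) + 1) = some b := by
      have := PySem.List.pyGet?_append_length (pre := pre ++ [a]) (y := b) (ys := r')
      simpa using this
    have hidx : ((pre.length : Int) + 1 - 1) = (pre.length : Int) := by ring
    have h0 : PySem.List.pyGet? (pre ++ a :: b :: r') ((pre.length : Int) + 1 - 1) = some a := by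
      rw [hidx]; exact PySem.List.pyGet?_append_length (pre := pre) (y := a) (ys := b :: r')
    rw [h1, h0]
    have hL : pre ++ a :: b :: r' = (pre ++ [a]) ++ b :: r' := by simp
    have hstart : (pre.length : Int) + 1 + 1 = ((pre ++ [a]).length : Int) + 1 := by
      simp
    rw [hL, hstart, ih (pre ++ [a]) b (if some b = some a then c + 1 else c)]
    by_cases hab : b = a
    · rw [if_pos (by rw [hab])]
      subst hab
      show c + 1 + pvPairs (b :: r') = c + ((if b = b then 1 else 0) + pvPairs (b :: r'))
      rw [if_pos rfl]; ring
    · rw [if_neg (by simpa using hab)]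
      show c + pvPairs (b :: r') = c + ((if a = b then 1 else 0) + pvPairs (b :: r'))
      rw [if_neg (fun hh => hab hh.symm)]; ring

lemma a_eq_pairs (text : String) : count_repeated_chars_py text = pvPairs text.toList := by
  unfold count_repeated_chars_py
  rcases hl : text.toList with _ | ⟨a, t⟩
  · simp [pvPairs]
  · rw [if_neg (by simp)]
    have := keyA t [] a 0
    simpa using this

/-- extracting the maximal run equal to `c` from `t` accounts for exactly
`(pvTakeRun c t).1` equal-adjacent pairs of `c :: t`. -/
lemma pairs_takeRun : ∀ (t : List Char) (c : Char),
    pvPairs (c :: t) = ((pvTakeRun c t).1 : Int) + pvPairs (pvTakeRun c t).2 := by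
  intro t
  induction t with
  | nil => intro c; simp [pvPairs, pvTakeRun]
  | cons x t ih =>
    intro c
    by_cases h : x = c
    · subst h
      simp only [pvTakeRun, if_pos]
      show (if x = x then (1:Int) else 0) + pvPairs (x :: t) = _
      rw [if_pos rfl, ih x]
      push_cast; ring
    · simp only [pvTakeRun, if_neg h]
      show (if c = x then (1:Int) else 0) + pvPairs (x :: t) = (0:Nat) + pvPairs (x :: t)
      rw [if_neg (fun hh => h hh.symm)]
      simp

/-- B's second stage over the run lengths computes the pair count. -/
lemma sum_runLengths : ∀ (n : Nat) (l : List Char) (s : Int), l.length ≤ n →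
    (pvRunLengths l).foldl (fun s L => s + (L - 1)) s = s + pvPairs l := by
  intro n
  induction n with
  | zero =>
    intro l s h
    have : l = [] := List.eq_nil_of_length_eq_zero (Nat.le_zero.mp h)
    subst this; simp [pvRunLengths, pvPairs]
  | succ n ih =>
    intro l s h
    rcases l with _ | ⟨c, t⟩
    · simp [pvRunLengths, pvPairs]
    · rw [pvRunLengths, List.foldl_cons,
        ih _ _ (le_trans (pvTakeRun_snd_length c t) (Nat.lt_succ_iff.mp (by simpa using h)))]
      rw [pairs_takeRun t c]
      ring

lemma alt_eq_pairs (text : String) : count_repeated_chars_py_alt text = pvPairs text.toList := by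
  unfold count_repeated_chars_py_alt
  have := sum_runLengths text.toList.length text.toList 0 le_rfl
  simpa using this

-- ===== VERDICT (by name: the statement is the Claim_ definition above) =====
theorem count_repeated_chars_py_spec : Claim_equal_count_repeated_chars_py := by
  intro text _
  unfold Spec_count_repeated_chars_py
  rw [a_eq_pairs, alt_eq_pairs]
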